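-- pv_equiv track=rewrite | github.com/byeol-hub/programmers | 프로그래머스/0/120861. 캐릭터의 좌표/캐릭터의 좌표.py | solution
-- ===== SOURCE A (Python) =====
-- def solution(keyinput, board):
--     answer = [0,0]
--
--     for i in keyinput:
--         if i == "left":
--             if answer[0] == -(board[0]//2):
--                 continue
--             else:
--                 answer[0] -= 1
--
--         elif i == "right":
--             if answer[0] == board[0]//2:
--                 continue
--             else:
--                 answer[0] += 1
--
--         elif i == "up":
--             if answer[1] == board[1]//2:
--                 continue
--             else:
--                 answer[1] += 1
--         else:
--             if answer[1] == -(board[1]//2):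
--                 continue
--             else:
--                 answer[1] -= 1
--
--     return answer
-- ===== SOURCE B (Python) =====
-- def solution(keyinput, board):
--     # The two axes are independent: split the key sequence into per-axis delta
--     # lists and run one generic bounded 1-D walk on each.
--     def walk(deltas, half):
--         v = 0
--         for d in deltas:
--             if not ((d < 0 and v == -half) or (d > 0 and v == half)):
--                 v += d
--         return v
--     horiz = {"left": -1, "right": 1}
--     xs = [horiz[k] for k in keyinput if k in horiz]
--     ys = [(1 if k == "up" else -1) for k in keyinput if k not in horiz]
--     return [walk(xs, board[0] // 2), walk(ys, board[1] // 2)]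
-- ===== Notes on version B (the rewrite author's own statement) =====
-- stated objective: alternative
-- what changed: B decomposes the 2-D walk into two independent 1-D walks: it splits the keys into per-axis delta lists and folds one generic boundary-guarded step over each axis, replacing A's single loop with a four-branch elif chain over a mutable [x,y] pair.
-- outside the precondition, e.g. on solution([], []): A returns [0, 0], B raises IndexError
import Mathlib
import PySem

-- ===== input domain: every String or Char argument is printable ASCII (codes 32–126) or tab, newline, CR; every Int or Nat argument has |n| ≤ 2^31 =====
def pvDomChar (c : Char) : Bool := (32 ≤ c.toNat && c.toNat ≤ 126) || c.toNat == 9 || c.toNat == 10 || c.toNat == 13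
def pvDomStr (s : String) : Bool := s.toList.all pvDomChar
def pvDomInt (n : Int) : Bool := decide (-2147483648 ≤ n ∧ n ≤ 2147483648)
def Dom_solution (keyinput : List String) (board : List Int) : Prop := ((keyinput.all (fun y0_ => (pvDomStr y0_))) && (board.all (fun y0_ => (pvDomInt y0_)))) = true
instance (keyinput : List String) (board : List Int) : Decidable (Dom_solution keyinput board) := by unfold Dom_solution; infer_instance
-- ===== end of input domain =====

-- B splits the walk into two independent per-axis folds of one generic boundary-guarded
-- step instead of A's single loop with a four-branch elif chain over a mutable pair.

-- ===== PORT A =====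
-- A's loop body (the four-branch elif chain), as a named helper; b0/b1 stand for the
-- board[0]//2 / board[1]//2 expressions A evaluates inside the branches
def stepA (b0 b1 : Int) (answer : Int × Int) (i : String) : Int × Int :=
  if i = "left" then
    if answer.1 = -b0 then answer else (answer.1 - 1, answer.2)
  else if i = "right" then
    if answer.1 = b0 then answer else (answer.1 + 1, answer.2)
  else if i = "up" then
    if answer.2 = b1 then answer else (answer.1, answer.2 + 1)
  else
    if answer.2 = -b1 then answer else (answer.1, answer.2 - 1)

-- board[0]/board[1]: pyGetD is in range under Pre_solution (2 ≤ board.length)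
def solution (keyinput : List String) (board : List Int) : List Int :=
  let ans := keyinput.foldl
    (stepA (PySem.Int.floordiv (PySem.List.pyGetD board 0 0) 2)
           (PySem.Int.floordiv (PySem.List.pyGetD board 1 0) 2)) (0, 0)
  [ans.1, ans.2]

-- ===== PORT B =====
-- the body of Source B's generic 1-D bounded walk
def stepW (b : Int) (v d : Int) : Int :=
  if (d < 0 ∧ v = -b) ∨ (d > 0 ∧ v = b) then v else v + d

def walkAlt (deltas : List Int) (half : Int) : Int := deltas.foldl (stepW half) 0

def solution_alt (keyinput : List String) (board : List Int) : List Int :=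
  let xs := (keyinput.filter fun k => decide (k = "left" ∨ k = "right")).map
              (fun k => if k = "left" then (-1 : Int) else 1)
  let ys := (keyinput.filter fun k => !decide (k = "left" ∨ k = "right")).map
              (fun k => if k = "up" then (1 : Int) else -1)
  [walkAlt xs (PySem.Int.floordiv (PySem.List.pyGetD board 0 0) 2),
   walkAlt ys (PySem.Int.floordiv (PySem.List.pyGetD board 1 0) 2)]

-- ===== PRECONDITION & SPEC =====
-- Pre_ excludes boards with fewer than two entries: there the Python A raises IndexError
-- whenever a key touches a missing axis (and B always raises); this also excludes the
-- corner where keyinput never touches the missing axis and A still returns (e.g. [0,0]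
-- on ([], [])), on which B's unconditional board[0]/board[1] access raises.
def Pre_solution (keyinput : List String) (board : List Int) : Prop := 2 ≤ board.length
instance (keyinput : List String) (board : List Int) : Decidable (Pre_solution keyinput board) := by unfold Pre_solution; infer_instance
def pvWitness_solution : List String × List Int := (["left", "up", "down", "right"], [5, 3])

def Spec_solution (keyinput : List String) (board : List Int) (out : List Int) : Prop := out = solution_alt keyinput board
instance (keyinput : List String) (board : List Int) (out : List Int) : Decidable (Spec_solution keyinput board out) := by unfold Spec_solution; infer_instance

-- ===== CLAIM (what is proved, stated in full; the proofs are below) =====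
def Claim_equal_solution : Prop := ∀ (keyinput : List String) (board : List Int), Dom_solution keyinput board → Pre_solution keyinput board → Spec_solution keyinput board (solution keyinput board)

-- ===== LEMMAS AND PROOFS =====

-- A's single 2-D loop equals the pair of B's per-axis 1-D walks, for any bounds and start.
lemma loop_split (b0 b1 : Int) (ks : List String) : ∀ x y : Int,
    ks.foldl (stepA b0 b1) (x, y)
    = ( ((ks.filter fun k => decide (k = "left" ∨ k = "right")).map
           (fun k => if k = "left" then (-1 : Int) else 1)).foldl (stepW b0) x,
        ((ks.filter fun k => !decide (k = "left" ∨ k = "right")).map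
           (fun k => if k = "up" then (1 : Int) else -1)).foldl (stepW b1) y ) := by
  induction ks with
  | nil => intro x y; simp
  | cons i ks ih =>
    intro x y
    by_cases h1 : i = "left"
    · subst h1
      have f1 : List.filter (fun k => decide (k = "left" ∨ k = "right")) ("left" :: ks)
          = "left" :: List.filter (fun k => decide (k = "left" ∨ k = "right")) ks := by simp
      have f2 : List.filter (fun k => !decide (k = "left" ∨ k = "right")) ("left" :: ks)
          = List.filter (fun k => !decide (k = "left" ∨ k = "right")) ks := by simp
      have e1 : stepA b0 b1 (x, y) "left" = if x = -b0 then (x, y) else (x - 1, y) := by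
        simp [stepA]
      have e2 : stepW b0 x (if "left" = "left" then (-1 : Int) else 1)
          = if x = -b0 then x else x - 1 := by
        simp [stepW]; split_ifs <;> omega
      rw [List.foldl_cons, f1, f2, List.map_cons, List.foldl_cons, e1, e2]
      split_ifs with hb <;> exact ih _ y
    · by_cases h2 : i = "right"
      · subst h2
        have f1 : List.filter (fun k => decide (k = "left" ∨ k = "right")) ("right" :: ks)
            = "right" :: List.filter (fun k => decide (k = "left" ∨ k = "right")) ks := by simp
        have f2 : List.filter (fun k => !decide (k = "left" ∨ k = "right")) ("right" :: ks)
            = List.filter (fun k => !decide (k = "left" ∨ k = "right")) ks := by simp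
        have e1 : stepA b0 b1 (x, y) "right" = if x = b0 then (x, y) else (x + 1, y) := by
          simp [stepA]
        have e2 : stepW b0 x (if "right" = "left" then (-1 : Int) else 1)
            = if x = b0 then x else x + 1 := by
          simp [stepW]
        rw [List.foldl_cons, f1, f2, List.map_cons, List.foldl_cons, e1, e2]
        split_ifs with hb <;> exact ih _ y
      · by_cases h3 : i = "up"
        · subst h3
          have f1 : List.filter (fun k => decide (k = "left" ∨ k = "right")) ("up" :: ks)
              = List.filter (fun k => decide (k = "left" ∨ k = "right")) ks := by simp
          have f2 : List.filter (fun k => !decide (k = "left" ∨ k = "right")) ("up" :: ks)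
              = "up" :: List.filter (fun k => !decide (k = "left" ∨ k = "right")) ks := by simp
          have e1 : stepA b0 b1 (x, y) "up" = if y = b1 then (x, y) else (x, y + 1) := by
            simp [stepA]
          have e2 : stepW b1 y (if "up" = "up" then (1 : Int) else -1)
              = if y = b1 then y else y + 1 := by
            simp [stepW]
          rw [List.foldl_cons, f1, f2, List.map_cons, List.foldl_cons, e1, e2]
          split_ifs with hb <;> exact ih x _
        · have f1 : List.filter (fun k => decide (k = "left" ∨ k = "right")) (i :: ks)
              = List.filter (fun k => decide (k = "left" ∨ k = "right")) ks := by
            simp [h1, h2]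
          have f2 : List.filter (fun k => !decide (k = "left" ∨ k = "right")) (i :: ks)
              = i :: List.filter (fun k => !decide (k = "left" ∨ k = "right")) ks := by
            simp [h1, h2]
          have e1 : stepA b0 b1 (x, y) i = if y = -b1 then (x, y) else (x, y - 1) := by
            simp [stepA, h1, h2, h3]
          have e2 : stepW b1 y (if i = "up" then (1 : Int) else -1)
              = if y = -b1 then y else y - 1 := by
            simp [stepW, h3]; split_ifs <;> omega
          rw [List.foldl_cons, f1, f2, List.map_cons, List.foldl_cons, e1, e2]
          split_ifs with hb <;> exact ih x _

-- ===== VERDICT (by name: the statement is the Claim_ definition above) =====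
theorem solution_spec : Claim_equal_solution := by
  intro keyinput board _ _
  unfold Spec_solution solution solution_alt walkAlt
  rw [loop_split]
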